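-- pv_equiv track=rewrite | github.com/PatriciaMoraru/DSL_laboratory_works | LW5/cnf_form.py | _generate_nullable_variations
-- ===== SOURCE A (Python) =====
-- from itertools import product
--
-- def _generate_nullable_variations(rule, nullable):
--     indices = [i for i, ch in enumerate(rule) if ch in nullable]
--     variations = set()
--
--     for mask in product([0, 1], repeat=len(indices)):
--         temp = list(rule)
--         for i, keep in zip(indices, mask):
--             if not keep:
--                 temp[i] = ""
--         alt = "".join(temp)
--         variations.add(alt)
--
--     return variations
-- ===== SOURCE B (Python) =====
-- def _generate_nullable_variations(rule, nullable):
--     variations = {""}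
--     for ch in rule:
--         if ch in nullable:
--             nxt = set()
--             for p in variations:
--                 nxt.add(p)
--                 nxt.add(p + ch)
--             variations = nxt
--         else:
--             variations = {p + ch for p in variations}
--     return variations
-- ===== Notes on version B (the rewrite author's own statement) =====
-- stated objective: alternative
-- what changed: Replaces the bitmask enumeration (2^k masks, each rebuilding and re-joining the whole rule) by a single left-to-right pass that grows a deduplicated frontier of partial strings, forking on nullable characters.
import Mathlib
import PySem

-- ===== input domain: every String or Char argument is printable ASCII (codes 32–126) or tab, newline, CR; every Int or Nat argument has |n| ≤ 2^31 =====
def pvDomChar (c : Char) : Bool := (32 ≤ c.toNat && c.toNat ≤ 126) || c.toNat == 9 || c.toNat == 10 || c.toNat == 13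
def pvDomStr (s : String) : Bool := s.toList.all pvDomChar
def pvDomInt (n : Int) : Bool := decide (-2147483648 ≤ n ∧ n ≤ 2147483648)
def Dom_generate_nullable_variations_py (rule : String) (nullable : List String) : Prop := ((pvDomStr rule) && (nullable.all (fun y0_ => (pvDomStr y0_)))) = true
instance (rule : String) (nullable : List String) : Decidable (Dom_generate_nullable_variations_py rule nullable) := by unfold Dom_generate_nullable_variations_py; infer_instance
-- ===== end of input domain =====

-- B replaces A's bitmask enumeration by one left-to-right pass growing a deduplicated
-- frontier of partial strings (objective: alternative decomposition, same result set).

-- ===== PORT A =====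
-- itertools.product([0, 1], repeat=k), in itertools order (leftmost position varies slowest)
def pvMasks : Nat → List (List Nat)
  | 0 => [[]]
  | k + 1 => (pvMasks k).map (fun m => 0 :: m) ++ (pvMasks k).map (fun m => 1 :: m)

def generate_nullable_variations_py (rule : String) (nullable : List String) : List String :=
  let chars := rule.toList
  -- indices = [i for i, ch in enumerate(rule) if ch in nullable]
  let indices : List Int := (PySem.List.enumerate chars).filterMap
    (fun p => if String.ofList [p.2] ∈ nullable then some p.1 else none)
  -- for mask in product([0,1], repeat=len(indices)): … variations.add(alt)
  (pvMasks indices.length).foldl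
    (fun variations mask =>
      let temp : List String := chars.map (fun c => String.ofList [c])   -- temp = list(rule)
      let temp := (indices.zip mask).foldl
        (fun t ik => if ik.2 = 0 then PySem.List.pySetD t ik.1 "" else t) temp
      let alt := PySem.Str.join "" temp
      PySem.Set.add variations alt)
    PySem.Set.empty

-- ===== PORT B =====
def generate_nullable_variations_py_alt (rule : String) (nullable : List String) : List String :=
  rule.toList.foldl
    (fun variations c =>
      let ch := String.ofList [c]
      if ch ∈ nullable then
        variations.foldl
          (fun nxt p => PySem.Set.add (PySem.Set.add nxt p) (p ++ ch)) PySem.Set.empty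
      else
        variations.foldl
          (fun nxt p => PySem.Set.add nxt (p ++ ch)) PySem.Set.empty)
    (PySem.Set.ofList [""])

-- ===== PRECONDITION & SPEC =====
def Spec_generate_nullable_variations_py (rule : String) (nullable : List String) (out : List String) : Prop := out = generate_nullable_variations_py_alt rule nullable
instance (rule : String) (nullable : List String) (out : List String) : Decidable (Spec_generate_nullable_variations_py rule nullable out) := by unfold Spec_generate_nullable_variations_py; infer_instance

-- ===== CLAIM (what is proved, stated in full; the proofs are below) =====
def Claim_equal_generate_nullable_variations_py : Prop := ∀ (rule : String) (nullable : List String), Dom_generate_nullable_variations_py rule nullable → Spec_generate_nullable_variations_py rule nullable (generate_nullable_variations_py rule nullable)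


-- ===== LEMMAS AND PROOFS =====

-- the common intermediate value: every variation, in A's mask order, before set-dedup
def pvG (nullable : List String) : List Char → List String
  | [] => [""]
  | c :: cs =>
    if String.ofList [c] ∈ nullable then
      pvG nullable cs ++ (pvG nullable cs).map (fun s => String.ofList [c] ++ s)
    else
      (pvG nullable cs).map (fun s => String.ofList [c] ++ s)

-- one frontier fork of B, as a list
def pvFork (nullable : List String) (c : Char) (p : String) : List String :=
  if String.ofList [c] ∈ nullable then [p, p ++ String.ofList [c]] else [p ++ String.ofList [c]]

-- what foldl Set.add appends on top of already-seen elements s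
def pvDedup (s : List String) : List String → List String
  | [] => []
  | x :: t => if x ∈ s then pvDedup s t else x :: pvDedup (s ++ [x]) t

def pvStep (t : List String) (ik : Int × Nat) : List String :=
  if ik.2 = 0 then PySem.List.pySetD t ik.1 "" else t

def pvIdx (nullable : List String) (cs : List Char) : List Int :=
  (PySem.List.enumerate cs).filterMap
    (fun p => if String.ofList [p.2] ∈ nullable then some p.1 else none)

def pvBuild (nullable : List String) (cs : List Char) (mask : List Nat) : String :=
  PySem.Str.join "" (((pvIdx nullable cs).zip mask).foldl pvStep (cs.map (fun c => String.ofList [c])))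

theorem pvEmpty : (PySem.Set.empty : List String) = [] := rfl

theorem pvFoldl_add (L : List String) : ∀ s : List String,
    L.foldl PySem.Set.add s = s ++ pvDedup s L := by
  induction L with
  | nil => intro s; simp [pvDedup]
  | cons x t ih =>
    intro s
    by_cases h : x ∈ s <;> simp [pvDedup, PySem.Set.add, PySem.Set.contains, h, ih]

theorem pvOfList_eq (L : List String) : PySem.Set.ofList L = pvDedup [] L := by
  simpa using (PySem.Set.ofList_eq_foldl L).trans (pvFoldl_add L [])

theorem pvDedup_cons_pos {x : String} {s : List String} (t : List String) (h : x ∈ s) :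
    pvDedup s (x :: t) = pvDedup s t := by simp [pvDedup, h]

theorem pvDedup_cons_neg {x : String} {s : List String} (t : List String) (h : x ∉ s) :
    pvDedup s (x :: t) = x :: pvDedup (s ++ [x]) t := by simp [pvDedup, h]

theorem mem_pvDedup (y : String) (L : List String) : ∀ s,
    y ∈ pvDedup s L ↔ y ∈ L ∧ y ∉ s := by
  induction L with
  | nil => intro s; simp [pvDedup]
  | cons x t ih =>
    intro s
    by_cases h : x ∈ s
    · rw [pvDedup_cons_pos t h, ih s]
      constructor
      · rintro ⟨ht, hs⟩; exact ⟨List.mem_cons.2 (Or.inr ht), hs⟩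
      · rintro ⟨hc, hs⟩
        rcases List.mem_cons.1 hc with rfl | ht
        · exact absurd h hs
        · exact ⟨ht, hs⟩
    · rw [pvDedup_cons_neg t h]
      constructor
      · intro hy
        rcases List.mem_cons.1 hy with rfl | hy'
        · exact ⟨List.mem_cons.2 (Or.inl rfl), h⟩
        · rcases (ih (s ++ [x])).1 hy' with ⟨ht, hs⟩
          exact ⟨List.mem_cons.2 (Or.inr ht), fun hys => hs (List.mem_append.2 (Or.inl hys))⟩
      · rintro ⟨hc, hs⟩
        rcases List.mem_cons.1 hc with rfl | ht
        · exact List.mem_cons.2 (Or.inl rfl)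
        · by_cases hyx : y = x
          · exact List.mem_cons.2 (Or.inl hyx)
          · refine List.mem_cons.2 (Or.inr ((ih (s ++ [x])).2 ⟨ht, ?_⟩))
            intro hmem
            rcases List.mem_append.1 hmem with hmem | hmem
            · exact hs hmem
            · exact hyx (by simpa using hmem)

theorem pvDedup_append (u v : List String) : ∀ s,
    pvDedup s (u ++ v) = pvDedup s u ++ pvDedup (s ++ pvDedup s u) v := by
  induction u with
  | nil => intro s; simp [pvDedup]
  | cons x u' ih =>
    intro s
    by_cases h : x ∈ s
    · rw [List.cons_append, pvDedup_cons_pos _ h, pvDedup_cons_pos _ h, ih s]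
    · rw [List.cons_append, pvDedup_cons_neg _ h, pvDedup_cons_neg _ h, ih (s ++ [x])]
      simp [List.append_assoc]

theorem pvDedup_nil_of_subset (u : List String) (s : List String)
    (h : ∀ y ∈ u, y ∈ s) : pvDedup s u = [] := by
  induction u with
  | nil => rfl
  | cons x t ih =>
    rw [pvDedup_cons_pos t (h x (by simp))]
    exact ih (fun y hy => h y (by simp [hy]))

theorem pvKey (f : String → List String) : ∀ (L : List String) (sP sR : List String),
    (∀ p ∈ sP, ∀ y ∈ f p, y ∈ sR) →
    pvDedup sR ((pvDedup sP L).flatMap f) = pvDedup sR (L.flatMap f) := by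
  intro L
  induction L with
  | nil => intro sP sR _; simp [pvDedup]
  | cons x t ih =>
    intro sP sR hsub
    by_cases h : x ∈ sP
    · have hfx : pvDedup sR (f x) = [] := pvDedup_nil_of_subset _ _ (hsub x h)
      rw [pvDedup_cons_pos t h, List.flatMap_cons, pvDedup_append, hfx, ih sP sR hsub]
      simp
    · rw [pvDedup_cons_neg t h, List.flatMap_cons, List.flatMap_cons,
        pvDedup_append (f x), pvDedup_append (f x)]
      congr 1
      exact ih (sP ++ [x]) (sR ++ pvDedup sR (f x)) (by
        intro p hp y hy
        rcases List.mem_append.1 hp with hp | hp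
        · exact List.mem_append.2 (Or.inl (hsub p hp y hy))
        · have hpx : p = x := by simpa using hp
          subst hpx
          by_cases hyR : y ∈ sR
          · exact List.mem_append.2 (Or.inl hyR)
          · exact List.mem_append.2 (Or.inr ((mem_pvDedup y (f p) sR).2 ⟨hy, hyR⟩)))

theorem pvK (f : String → List String) (L : List String) :
    PySem.Set.ofList ((PySem.Set.ofList L).flatMap f) = PySem.Set.ofList (L.flatMap f) := by
  rw [pvOfList_eq, pvOfList_eq L, pvOfList_eq]
  exact pvKey f L [] [] (by simp)

-- B's two inner loops are foldl Set.add over the forked lists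
theorem pvB_null_loop (ch : String) (vars : List String) : ∀ init : List String,
    vars.foldl (fun nxt p => PySem.Set.add (PySem.Set.add nxt p) (p ++ ch)) init
      = (vars.flatMap (fun p => [p, p ++ ch])).foldl PySem.Set.add init := by
  induction vars with
  | nil => intro init; rfl
  | cons x t ih => intro init; simp [ih, List.foldl_cons]

theorem pvB_plain_loop (ch : String) (vars : List String) : ∀ init : List String,
    vars.foldl (fun nxt p => PySem.Set.add nxt (p ++ ch)) init
      = (vars.flatMap (fun p => [p ++ ch])).foldl PySem.Set.add init := by
  induction vars with
  | nil => intro init; rfl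
  | cons x t ih => intro init; simp [ih, List.foldl_cons]

theorem pvB_invariant (nullable : List String) : ∀ (cs : List Char) (L : List String),
    cs.foldl
      (fun variations c =>
        let ch := String.ofList [c]
        if ch ∈ nullable then
          variations.foldl
            (fun nxt p => PySem.Set.add (PySem.Set.add nxt p) (p ++ ch)) PySem.Set.empty
        else
          variations.foldl
            (fun nxt p => PySem.Set.add nxt (p ++ ch)) PySem.Set.empty)
      (PySem.Set.ofList L)
    = PySem.Set.ofList (cs.foldl (fun acc c => acc.flatMap (pvFork nullable c)) L) := by
  intro cs
  induction cs with
  | nil => intro L; rfl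
  | cons c cs ih =>
    intro L
    have hstep :
        (let ch := String.ofList [c]
         if ch ∈ nullable then
           (PySem.Set.ofList L).foldl
             (fun nxt p => PySem.Set.add (PySem.Set.add nxt p) (p ++ ch)) PySem.Set.empty
         else
           (PySem.Set.ofList L).foldl
             (fun nxt p => PySem.Set.add nxt (p ++ ch)) PySem.Set.empty)
        = PySem.Set.ofList (L.flatMap (pvFork nullable c)) := by
      by_cases h : String.ofList [c] ∈ nullable
      · simp only [h, if_pos]
        rw [pvB_null_loop, pvEmpty, ← PySem.Set.ofList_eq_foldl]
        rw [show (fun p => [p, p ++ String.ofList [c]]) = pvFork nullable c from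
          funext fun p => by simp [pvFork, h]]
        exact pvK (pvFork nullable c) L
      · simp only [h, if_neg, not_false_iff]
        rw [pvB_plain_loop, pvEmpty, ← PySem.Set.ofList_eq_foldl]
        rw [show (fun p => [p ++ String.ofList [c]]) = pvFork nullable c from
          funext fun p => by simp [pvFork, h]]
        exact pvK (pvFork nullable c) L
    simp only [List.foldl_cons]
    rw [hstep, ih]

theorem pvFG (nullable : List String) : ∀ (cs : List Char) (acc : List String),
    cs.foldl (fun acc c => acc.flatMap (pvFork nullable c)) acc
      = acc.flatMap (fun p => (pvG nullable cs).map (fun s => p ++ s)) := by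
  intro cs
  induction cs with
  | nil =>
    intro acc
    simp [pvG, String.append_empty]
  | cons c cs ih =>
    intro acc
    simp only [List.foldl_cons]
    rw [ih, List.flatMap_assoc]
    by_cases h : String.ofList [c] ∈ nullable
    · simp only [pvG, h, if_pos]
      refine List.flatMap_congr ?_
      intro x hx
      simp [pvFork, h, List.map_map, Function.comp, String.append_assoc]
    · simp only [pvG, h, if_neg, not_false_iff]
      refine List.flatMap_congr ?_
      intro x hx
      simp [pvFork, h, List.map_map, Function.comp, String.append_assoc]

-- ===== A side =====

theorem pvEnumShift {α : Type} (xs : List α) : ∀ s : Int,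
    PySem.List.enumerate xs (s + 1) = (PySem.List.enumerate xs s).map (fun p => (p.1 + 1, p.2)) := by
  induction xs with
  | nil => intro s; simp [PySem.List.enumerate_nil]
  | cons x t ih =>
    intro s
    rw [PySem.List.enumerate_cons, PySem.List.enumerate_cons, List.map_cons, ih (s + 1)]

theorem pvIdx_cons (nullable : List String) (c : Char) (cs : List Char) :
    pvIdx nullable (c :: cs)
      = (if String.ofList [c] ∈ nullable then [(0 : Int)] else [])
        ++ (pvIdx nullable cs).map (fun i => i + 1) := by
  unfold pvIdx
  rw [PySem.List.enumerate_cons, pvEnumShift cs 0, List.filterMap_cons, List.filterMap_map,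
    List.map_filterMap]
  have hfun : ((fun p : Int × Char => if String.ofList [p.2] ∈ nullable then some p.1 else none)
        ∘ (fun p : Int × Char => (p.1 + 1, p.2)))
      = fun p : Int × Char =>
          Option.map (fun i => i + 1) (if String.ofList [p.2] ∈ nullable then some p.1 else none) := by
    funext p
    by_cases hp : String.ofList [p.2] ∈ nullable <;> simp [hp]
  rw [hfun]
  by_cases h : String.ofList [c] ∈ nullable <;> simp [h]

theorem pvIdx_nonneg (nullable : List String) (cs : List Char) :
    ∀ i ∈ pvIdx nullable cs, 0 ≤ i := by
  intro i hi
  unfold pvIdx at hi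
  rcases List.mem_filterMap.1 hi with ⟨p, hp, hpi⟩
  rcases (PySem.List.mem_enumerate_iff _ _ _).1 hp with ⟨k, hk, rfl⟩
  split_ifs at hpi with h
  · simp at hpi; omega

theorem pvShiftFold (pairs : List (Int × Nat)) : ∀ (x : String) (t : List String),
    (∀ p ∈ pairs, 0 ≤ p.1) →
    (pairs.map (fun p => (p.1 + 1, p.2))).foldl pvStep (x :: t)
      = x :: pairs.foldl pvStep t := by
  induction pairs with
  | nil => intro x t _; rfl
  | cons q qs ih =>
    intro x t hq
    obtain ⟨i, b⟩ := q
    have hi : 0 ≤ i := hq (i, b) (by simp)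
    simp only [List.map_cons, List.foldl_cons]
    by_cases hb : b = 0
    · have h1 : pvStep (x :: t) (i + 1, b) = x :: t.set i.toNat "" := by
        rw [pvStep, if_pos (by simpa using hb),
          PySem.List.pySetD_of_nonneg _ _ (by omega : (0 : Int) ≤ i + 1),
          show (i + 1).toNat = i.toNat + 1 from by omega, List.set_cons_succ]
      have h2 : pvStep t (i, b) = t.set i.toNat "" := by
        rw [pvStep, if_pos (by simpa using hb), PySem.List.pySetD_of_nonneg _ _ hi]
      rw [h1, h2]
      exact ih x (t.set i.toNat "") (fun p hp => hq p (by simp [hp]))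
    · have h1 : pvStep (x :: t) (i + 1, b) = x :: t := by
        rw [pvStep, if_neg (by simpa using hb)]
      have h2 : pvStep t (i, b) = t := by
        rw [pvStep, if_neg (by simpa using hb)]
      rw [h1, h2]
      exact ih x t (fun p hp => hq p (by simp [hp]))

theorem pvJoin_nil : PySem.Str.join "" [] = "" := rfl

theorem pvJoin_cons (x : String) (xs : List String) :
    PySem.Str.join "" (x :: xs) = x ++ PySem.Str.join "" xs := by
  cases xs with
  | nil =>
    apply String.toList_inj.mp
    rw [PySem.Str.toList_join]
    simp [PySem.Chars.join_singleton, pvJoin_nil]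
  | cons y ys =>
    apply String.toList_inj.mp
    rw [PySem.Str.toList_join, String.toList_append, PySem.Str.toList_join]
    simp only [List.map_cons]
    rw [PySem.Chars.join_cons_cons]
    simp

theorem pvZip_shift (nullable : List String) (cs : List Char) (m : List Nat) :
    (((pvIdx nullable cs).map (fun i => i + 1)).zip m)
      = ((pvIdx nullable cs).zip m).map (fun p => (p.1 + 1, p.2)) := by
  rw [List.zip_map_left]
  exact List.map_congr_left (fun p _ => by cases p; rfl)

theorem pvShiftBuild (nullable : List String) (cs : List Char) (m : List Nat) (x : String) :
    (((pvIdx nullable cs).map (fun i => i + 1)).zip m).foldl pvStep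
        (x :: cs.map (fun c => String.ofList [c]))
      = x :: ((pvIdx nullable cs).zip m).foldl pvStep (cs.map (fun c => String.ofList [c])) := by
  rw [pvZip_shift]
  exact pvShiftFold _ x _ (fun p hp =>
    pvIdx_nonneg nullable cs p.1 (by cases p; exact (List.of_mem_zip hp).1))


theorem pvBuild0 (nullable : List String) (c : Char) (cs : List Char)
    (h : String.ofList [c] ∈ nullable) (m : List Nat) :
    pvBuild nullable (c :: cs) (0 :: m) = pvBuild nullable cs m := by
  unfold pvBuild
  rw [pvIdx_cons]
  simp only [h, if_pos, List.cons_append, List.nil_append, List.map_cons]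
  rw [List.zip_cons_cons, List.foldl_cons]
  have hhead : pvStep (String.ofList [c] :: cs.map (fun c => String.ofList [c])) ((0 : Int), (0 : Nat))
      = "" :: cs.map (fun c => String.ofList [c]) := by
    rw [pvStep, if_pos rfl, PySem.List.pySetD_of_nonneg _ _ (le_refl (0 : Int))]
    rfl
  rw [hhead, pvShiftBuild, pvJoin_cons, String.empty_append]

theorem pvBuild1 (nullable : List String) (c : Char) (cs : List Char)
    (h : String.ofList [c] ∈ nullable) (m : List Nat) :
    pvBuild nullable (c :: cs) (1 :: m) = String.ofList [c] ++ pvBuild nullable cs m := by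
  unfold pvBuild
  rw [pvIdx_cons]
  simp only [h, if_pos, List.cons_append, List.nil_append, List.map_cons]
  rw [List.zip_cons_cons, List.foldl_cons]
  have hhead : pvStep (String.ofList [c] :: cs.map (fun c => String.ofList [c])) ((0 : Int), (1 : Nat))
      = String.ofList [c] :: cs.map (fun c => String.ofList [c]) := by
    rw [pvStep, if_neg (by norm_num)]
  rw [hhead, pvShiftBuild, pvJoin_cons]

theorem pvBuildKeep (nullable : List String) (c : Char) (cs : List Char)
    (h : String.ofList [c] ∉ nullable) (m : List Nat) :
    pvBuild nullable (c :: cs) m = String.ofList [c] ++ pvBuild nullable cs m := by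
  unfold pvBuild
  rw [pvIdx_cons]
  simp only [h, if_neg, not_false_iff, List.nil_append, List.map_cons]
  rw [pvShiftBuild, pvJoin_cons]

theorem pvA_main (nullable : List String) : ∀ cs : List Char,
    (pvMasks (pvIdx nullable cs).length).map (pvBuild nullable cs) = pvG nullable cs := by
  intro cs
  induction cs with
  | nil =>
    rw [show pvIdx nullable [] = [] from by simp [pvIdx, PySem.List.enumerate_nil]]
    simp [pvMasks, pvBuild, pvG, pvJoin_nil, pvIdx, PySem.List.enumerate_nil]
  | cons c cs ih =>
    by_cases h : String.ofList [c] ∈ nullable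
    · have hlen : (pvIdx nullable (c :: cs)).length = (pvIdx nullable cs).length + 1 := by
        rw [pvIdx_cons]; simp [h]
      rw [hlen,
        show pvMasks ((pvIdx nullable cs).length + 1)
          = (pvMasks (pvIdx nullable cs).length).map (fun m => 0 :: m)
            ++ (pvMasks (pvIdx nullable cs).length).map (fun m => 1 :: m) from rfl,
        List.map_append, List.map_map, List.map_map]
      have e0 : (pvMasks (pvIdx nullable cs).length).map (pvBuild nullable (c :: cs) ∘ (fun m => 0 :: m))
          = (pvMasks (pvIdx nullable cs).length).map (pvBuild nullable cs) :=
        List.map_congr_left (fun m _ => pvBuild0 nullable c cs h m)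
      have e1 : (pvMasks (pvIdx nullable cs).length).map (pvBuild nullable (c :: cs) ∘ (fun m => 1 :: m))
          = (pvMasks (pvIdx nullable cs).length).map
              (fun m => String.ofList [c] ++ pvBuild nullable cs m) :=
        List.map_congr_left (fun m _ => pvBuild1 nullable c cs h m)
      rw [e0, e1, ih,
        show (fun m => String.ofList [c] ++ pvBuild nullable cs m)
          = (fun s => String.ofList [c] ++ s) ∘ pvBuild nullable cs from rfl,
        ← List.map_map, ih]
      simp [pvG, h]
    · have hlen : (pvIdx nullable (c :: cs)).length = (pvIdx nullable cs).length := by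
        rw [pvIdx_cons]; simp [h]
      rw [hlen,
        List.map_congr_left (fun m _ => pvBuildKeep nullable c cs h m),
        show (fun m => String.ofList [c] ++ pvBuild nullable cs m)
          = (fun s => String.ofList [c] ++ s) ∘ pvBuild nullable cs from rfl,
        ← List.map_map, ih]
      simp [pvG, h]

theorem pvA_eq (rule : String) (nullable : List String) :
    generate_nullable_variations_py rule nullable
      = PySem.Set.ofList (pvG nullable rule.toList) := by
  unfold generate_nullable_variations_py
  show (pvMasks (pvIdx nullable rule.toList).length).foldl
      (fun variations mask => PySem.Set.add variations (pvBuild nullable rule.toList mask))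
      PySem.Set.empty = _
  rw [← List.foldl_map (f := pvBuild nullable rule.toList) (g := PySem.Set.add), pvEmpty,
    ← PySem.Set.ofList_eq_foldl, pvA_main]

theorem pvB_eq (rule : String) (nullable : List String) :
    generate_nullable_variations_py_alt rule nullable
      = PySem.Set.ofList (pvG nullable rule.toList) := by
  unfold generate_nullable_variations_py_alt
  rw [pvB_invariant nullable rule.toList [""], pvFG nullable rule.toList [""]]
  have hsingle : ([""] : List String).flatMap
      (fun p => (pvG nullable rule.toList).map (fun s => p ++ s)) = pvG nullable rule.toList := by
    simp [String.empty_append]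
  rw [hsingle]

-- ===== VERDICT (by name: the statement is the Claim_ definition above) =====
theorem generate_nullable_variations_py_spec : Claim_equal_generate_nullable_variations_py := by
  unfold Claim_equal_generate_nullable_variations_py
  intro rule nullable _
  unfold Spec_generate_nullable_variations_py
  rw [pvA_eq, pvB_eq]
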